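-- pv_equiv track=rewrite | github.com/MaazHafeez12/scrapper | analytics.py | _salary_ranges
-- ===== SOURCE A (Python) =====
-- from typing import Dict, List, Tuple, Optional
--
-- def _salary_ranges(salaries: List[int]) -> Dict:
--     """Group salaries into ranges"""
--     ranges = {
--         '<50k': 0,
--         '50k-75k': 0,
--         '75k-100k': 0,
--         '100k-125k': 0,
--         '125k-150k': 0,
--         '150k-200k': 0,
--         '>200k': 0
--     }
--
--     for salary in salaries:
--         if salary < 50000:
--             ranges['<50k'] += 1
--         elif salary < 75000:
--             ranges['50k-75k'] += 1
--         elif salary < 100000: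
--             ranges['75k-100k'] += 1
--         elif salary < 125000:
--             ranges['100k-125k'] += 1
--         elif salary < 150000:
--             ranges['125k-150k'] += 1
--         elif salary < 200000:
--             ranges['150k-200k'] += 1
--         else:
--             ranges['>200k'] += 1
--
--     return ranges
-- ===== SOURCE B (Python) =====
-- def _salary_ranges(salaries):
--     """Group salaries into ranges (boundary table + counts vector)."""
--     bounds = [50000, 75000, 100000, 125000, 150000, 200000]
--     labels = ['<50k', '50k-75k', '75k-100k', '100k-125k',
--               '125k-150k', '150k-200k', '>200k']
--     counts = [0] * 7
--     for s in salaries: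
--         counts[sum(b <= s for b in bounds)] += 1
--     return dict(zip(labels, counts))
-- ===== Notes on version B (the rewrite author's own statement) =====
-- stated objective: alternative
-- what changed: Replaces the seven-way if-elif cascade updating a pre-built dict with a boundary table: each salary's bucket index is computed as the number of boundaries <= it, a counts vector is incremented, and the dict is assembled once at the end from zip(labels, counts).
import Mathlib
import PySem

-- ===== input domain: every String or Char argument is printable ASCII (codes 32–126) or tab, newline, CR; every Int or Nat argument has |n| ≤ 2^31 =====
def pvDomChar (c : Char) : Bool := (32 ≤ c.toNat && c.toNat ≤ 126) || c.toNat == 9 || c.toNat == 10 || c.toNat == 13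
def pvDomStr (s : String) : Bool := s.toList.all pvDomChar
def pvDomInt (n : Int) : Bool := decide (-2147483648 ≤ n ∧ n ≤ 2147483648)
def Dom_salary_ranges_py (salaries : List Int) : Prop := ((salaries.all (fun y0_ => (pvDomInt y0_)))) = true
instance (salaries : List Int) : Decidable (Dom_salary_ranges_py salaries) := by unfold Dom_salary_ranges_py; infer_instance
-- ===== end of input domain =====

-- B replaces A's seven-way if-elif dict cascade with a boundary table: bucket index = number of boundaries ≤ salary, counts vector, dict built once at the end.

-- ===== PORT A =====
-- the if-elif cascade, one dict.modify per salary, as in A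
def pvStepA (d : PySem.Dict String Int) (salary : Int) : PySem.Dict String Int :=
  if salary < 50000 then d.modify "<50k" 0 (· + 1)
  else if salary < 75000 then d.modify "50k-75k" 0 (· + 1)
  else if salary < 100000 then d.modify "75k-100k" 0 (· + 1)
  else if salary < 125000 then d.modify "100k-125k" 0 (· + 1)
  else if salary < 150000 then d.modify "125k-150k" 0 (· + 1)
  else if salary < 200000 then d.modify "150k-200k" 0 (· + 1)
  else d.modify ">200k" 0 (· + 1)

def salary_ranges_py (salaries : List Int) : List (String × Int) :=
  let ranges : PySem.Dict String Int := PySem.Dict.ofList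
    [("<50k", 0), ("50k-75k", 0), ("75k-100k", 0), ("100k-125k", 0),
     ("125k-150k", 0), ("150k-200k", 0), (">200k", 0)]
  (salaries.foldl pvStepA ranges).items

-- ===== PORT B =====
def pvBounds : List Int := [50000, 75000, 100000, 125000, 150000, 200000]
def pvLabels : List String :=
  ["<50k", "50k-75k", "75k-100k", "100k-125k", "125k-150k", "150k-200k", ">200k"]

-- counts[sum(b <= s for b in bounds)] += 1
def pvStepB (counts : List Int) (s : Int) : List Int :=
  let i := ((pvBounds.map (fun b => if b ≤ s then (1 : Int) else 0)).sum).toNat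
  counts.set i (counts.getD i 0 + 1)

def salary_ranges_py_alt (salaries : List Int) : List (String × Int) :=
  pvLabels.zip (salaries.foldl pvStepB (List.replicate 7 0))

-- ===== PRECONDITION & SPEC =====
def Spec_salary_ranges_py (salaries : List Int) (out : List (String × Int)) : Prop := out = salary_ranges_py_alt salaries
instance (salaries : List Int) (out : List (String × Int)) : Decidable (Spec_salary_ranges_py salaries out) := by unfold Spec_salary_ranges_py; infer_instance

-- ===== CLAIM (what is proved, stated in full; the proofs are below) =====
def Claim_equal_salary_ranges_py : Prop := ∀ (salaries : List Int), Dom_salary_ranges_py salaries → Spec_salary_ranges_py salaries (salary_ranges_py salaries)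

-- ===== LEMMAS AND PROOFS =====

-- invariant: from any seven counter values, A's dict items = labels zipped with B's counts
theorem pv_inv (salaries : List Int) :
    ∀ (c0 c1 c2 c3 c4 c5 c6 : Int),
    (salaries.foldl pvStepA (PySem.Dict.mk
      [("<50k", c0), ("50k-75k", c1), ("75k-100k", c2), ("100k-125k", c3),
       ("125k-150k", c4), ("150k-200k", c5), (">200k", c6)])).items
    = pvLabels.zip (salaries.foldl pvStepB [c0, c1, c2, c3, c4, c5, c6]) := by
  induction salaries with
  | nil => intro c0 c1 c2 c3 c4 c5 c6; rfl
  | cons s rest ih =>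
    intro c0 c1 c2 c3 c4 c5 c6
    simp only [List.foldl_cons]
    by_cases h0 : s < 50000
    · have hA : pvStepA (PySem.Dict.mk [("<50k", c0), ("50k-75k", c1), ("75k-100k", c2), ("100k-125k", c3), ("125k-150k", c4), ("150k-200k", c5), (">200k", c6)]) s = PySem.Dict.mk [("<50k", c0 + 1), ("50k-75k", c1), ("75k-100k", c2), ("100k-125k", c3), ("125k-150k", c4), ("150k-200k", c5), (">200k", c6)] := by
        simp [pvStepA, show s < 50000 by omega]; rfl
      have hB : pvStepB [c0, c1, c2, c3, c4, c5, c6] s = [c0 + 1, c1, c2, c3, c4, c5, c6] := by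
        simp [pvStepB, pvBounds, show ¬((50000:Int) ≤ s) by omega, show ¬((75000:Int) ≤ s) by omega, show ¬((100000:Int) ≤ s) by omega, show ¬((125000:Int) ≤ s) by omega, show ¬((150000:Int) ≤ s) by omega, show ¬((200000:Int) ≤ s) by omega]
      rw [hA, hB, ih]
    by_cases h1 : s < 75000
    · have hA : pvStepA (PySem.Dict.mk [("<50k", c0), ("50k-75k", c1), ("75k-100k", c2), ("100k-125k", c3), ("125k-150k", c4), ("150k-200k", c5), (">200k", c6)]) s = PySem.Dict.mk [("<50k", c0), ("50k-75k", c1 + 1), ("75k-100k", c2), ("100k-125k", c3), ("125k-150k", c4), ("150k-200k", c5), (">200k", c6)] := by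
        simp [pvStepA, show ¬(s < 50000) by omega, show s < 75000 by omega]; rfl
      have hB : pvStepB [c0, c1, c2, c3, c4, c5, c6] s = [c0, c1 + 1, c2, c3, c4, c5, c6] := by
        simp [pvStepB, pvBounds, show (50000:Int) ≤ s by omega, show ¬((75000:Int) ≤ s) by omega, show ¬((100000:Int) ≤ s) by omega, show ¬((125000:Int) ≤ s) by omega, show ¬((150000:Int) ≤ s) by omega, show ¬((200000:Int) ≤ s) by omega]
      rw [hA, hB, ih]
    by_cases h2 : s < 100000
    · have hA : pvStepA (PySem.Dict.mk [("<50k", c0), ("50k-75k", c1), ("75k-100k", c2), ("100k-125k", c3), ("125k-150k", c4), ("150k-200k", c5), (">200k", c6)]) s = PySem.Dict.mk [("<50k", c0), ("50k-75k", c1), ("75k-100k", c2 + 1), ("100k-125k", c3), ("125k-150k", c4), ("150k-200k", c5), (">200k", c6)] := by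
        simp [pvStepA, show ¬(s < 50000) by omega, show ¬(s < 75000) by omega, show s < 100000 by omega]; rfl
      have hB : pvStepB [c0, c1, c2, c3, c4, c5, c6] s = [c0, c1, c2 + 1, c3, c4, c5, c6] := by
        simp [pvStepB, pvBounds, show (50000:Int) ≤ s by omega, show (75000:Int) ≤ s by omega, show ¬((100000:Int) ≤ s) by omega, show ¬((125000:Int) ≤ s) by omega, show ¬((150000:Int) ≤ s) by omega, show ¬((200000:Int) ≤ s) by omega]
      rw [hA, hB, ih]
    by_cases h3 : s < 125000
    · have hA : pvStepA (PySem.Dict.mk [("<50k", c0), ("50k-75k", c1), ("75k-100k", c2), ("100k-125k", c3), ("125k-150k", c4), ("150k-200k", c5), (">200k", c6)]) s = PySem.Dict.mk [("<50k", c0), ("50k-75k", c1), ("75k-100k", c2), ("100k-125k", c3 + 1), ("125k-150k", c4), ("150k-200k", c5), (">200k", c6)] := by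
        simp [pvStepA, show ¬(s < 50000) by omega, show ¬(s < 75000) by omega, show ¬(s < 100000) by omega, show s < 125000 by omega]; rfl
      have hB : pvStepB [c0, c1, c2, c3, c4, c5, c6] s = [c0, c1, c2, c3 + 1, c4, c5, c6] := by
        simp [pvStepB, pvBounds, show (50000:Int) ≤ s by omega, show (75000:Int) ≤ s by omega, show (100000:Int) ≤ s by omega, show ¬((125000:Int) ≤ s) by omega, show ¬((150000:Int) ≤ s) by omega, show ¬((200000:Int) ≤ s) by omega]
      rw [hA, hB, ih]
    by_cases h4 : s < 150000
    · have hA : pvStepA (PySem.Dict.mk [("<50k", c0), ("50k-75k", c1), ("75k-100k", c2), ("100k-125k", c3), ("125k-150k", c4), ("150k-200k", c5), (">200k", c6)]) s = PySem.Dict.mk [("<50k", c0), ("50k-75k", c1), ("75k-100k", c2), ("100k-125k", c3), ("125k-150k", c4 + 1), ("150k-200k", c5), (">200k", c6)] := by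
        simp [pvStepA, show ¬(s < 50000) by omega, show ¬(s < 75000) by omega, show ¬(s < 100000) by omega, show ¬(s < 125000) by omega, show s < 150000 by omega]; rfl
      have hB : pvStepB [c0, c1, c2, c3, c4, c5, c6] s = [c0, c1, c2, c3, c4 + 1, c5, c6] := by
        simp [pvStepB, pvBounds, show (50000:Int) ≤ s by omega, show (75000:Int) ≤ s by omega, show (100000:Int) ≤ s by omega, show (125000:Int) ≤ s by omega, show ¬((150000:Int) ≤ s) by omega, show ¬((200000:Int) ≤ s) by omega]
      rw [hA, hB, ih]
    by_cases h5 : s < 200000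
    · have hA : pvStepA (PySem.Dict.mk [("<50k", c0), ("50k-75k", c1), ("75k-100k", c2), ("100k-125k", c3), ("125k-150k", c4), ("150k-200k", c5), (">200k", c6)]) s = PySem.Dict.mk [("<50k", c0), ("50k-75k", c1), ("75k-100k", c2), ("100k-125k", c3), ("125k-150k", c4), ("150k-200k", c5 + 1), (">200k", c6)] := by
        simp [pvStepA, show ¬(s < 50000) by omega, show ¬(s < 75000) by omega, show ¬(s < 100000) by omega, show ¬(s < 125000) by omega, show ¬(s < 150000) by omega, show s < 200000 by omega]; rfl
      have hB : pvStepB [c0, c1, c2, c3, c4, c5, c6] s = [c0, c1, c2, c3, c4, c5 + 1, c6] := by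
        simp [pvStepB, pvBounds, show (50000:Int) ≤ s by omega, show (75000:Int) ≤ s by omega, show (100000:Int) ≤ s by omega, show (125000:Int) ≤ s by omega, show (150000:Int) ≤ s by omega, show ¬((200000:Int) ≤ s) by omega]
      rw [hA, hB, ih]
    · have hA : pvStepA (PySem.Dict.mk [("<50k", c0), ("50k-75k", c1), ("75k-100k", c2), ("100k-125k", c3), ("125k-150k", c4), ("150k-200k", c5), (">200k", c6)]) s = PySem.Dict.mk [("<50k", c0), ("50k-75k", c1), ("75k-100k", c2), ("100k-125k", c3), ("125k-150k", c4), ("150k-200k", c5), (">200k", c6 + 1)] := by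
        simp [pvStepA, show ¬(s < 50000) by omega, show ¬(s < 75000) by omega, show ¬(s < 100000) by omega, show ¬(s < 125000) by omega, show ¬(s < 150000) by omega, show ¬(s < 200000) by omega]; rfl
      have hB : pvStepB [c0, c1, c2, c3, c4, c5, c6] s = [c0, c1, c2, c3, c4, c5, c6 + 1] := by
        simp [pvStepB, pvBounds, show (50000:Int) ≤ s by omega, show (75000:Int) ≤ s by omega, show (100000:Int) ≤ s by omega, show (125000:Int) ≤ s by omega, show (150000:Int) ≤ s by omega, show (200000:Int) ≤ s by omega]
      rw [hA, hB, ih]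

-- ===== VERDICT (by name: the statement is the Claim_ definition above) =====
theorem salary_ranges_py_spec : Claim_equal_salary_ranges_py := by
  intro salaries _
  unfold Spec_salary_ranges_py salary_ranges_py salary_ranges_py_alt
  have := pv_inv salaries 0 0 0 0 0 0 0
  simpa [PySem.Dict.ofList] using this
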